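-- pv_equiv track=rewrite | github.com/shaypal5/foldermix | tests/integration/test_converters_noisy_real_files.py | _max_blank_run
-- ===== SOURCE A (Python) =====
-- def _max_blank_run(text: str) -> int:
--     longest = 0
--     current = 0
--     for line in text.splitlines():
--         if line.strip():
--             longest = max(longest, current)
--             current = 0
--         else:
--             current += 1
--     return max(longest, current)
-- ===== SOURCE B (Python) =====
-- def _max_blank_run(text: str) -> int:
--     # Encode each line as one flag char ('b' = blank, 'n' = non-blank), then the
--     # maximal blank run is simply the longest segment between 'n' markers.
--     flags = ''.join('n' if line.strip() else 'b' for line in text.splitlines())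
--     return max((len(seg) for seg in flags.split('n')), default=0)
-- ===== Notes on version B (the rewrite author's own statement) =====
-- stated objective: alternative
-- what changed: Replaces the (longest,current) accumulator loop by a run-length decomposition: lines are encoded as a flag string ('b' blank / 'n' non-blank), which is split on 'n' and the answer is the maximum segment length (max with default=0).
import Mathlib
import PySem

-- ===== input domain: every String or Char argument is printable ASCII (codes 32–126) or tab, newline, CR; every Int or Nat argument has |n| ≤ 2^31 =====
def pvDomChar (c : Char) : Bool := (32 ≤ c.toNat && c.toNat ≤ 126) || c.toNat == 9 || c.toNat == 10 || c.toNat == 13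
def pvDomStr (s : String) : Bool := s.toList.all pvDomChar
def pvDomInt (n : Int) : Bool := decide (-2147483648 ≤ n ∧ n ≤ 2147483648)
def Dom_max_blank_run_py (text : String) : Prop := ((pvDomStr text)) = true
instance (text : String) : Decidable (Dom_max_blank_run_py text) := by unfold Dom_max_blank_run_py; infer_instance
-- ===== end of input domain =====

-- B replaces A's (longest, current) accumulator loop by a run-length decomposition
-- (blank-flag encoding, split on the non-blank marker, maximum segment length);
-- same O(n) cost, alternative structure.

-- ===== PORT A =====
def max_blank_run_py (text : String) : Int :=
  let p := (PySem.Str.splitlines text).foldl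
    (fun (p : Int × Int) line =>
      if PySem.Str.strip line ≠ "" then (max p.1 p.2, 0) else (p.1, p.2 + 1))
    (0, 0)
  max p.1 p.2

-- ===== PORT B =====
-- ''.join of the one-char strings 'n'/'b' is the corresponding char list, so the
-- joined flag string is ported as a List Char; flags.split('n') is Chars.splitOn.
def max_blank_run_py_alt (text : String) : Int :=
  let flags : List Char :=
    (PySem.Str.splitlines text).map
      (fun line => if PySem.Str.strip line ≠ "" then 'n' else 'b')
  let segs := PySem.Chars.splitOn flags ['n']
  -- max(gen, default=0)
  match PySem.List.max? (segs.map (fun seg => (seg.length : Int))) (fun y => y) with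
  | some m => m
  | none => 0

-- ===== PRECONDITION & SPEC =====
def Spec_max_blank_run_py (text : String) (out : Int) : Prop := out = max_blank_run_py_alt text
instance (text : String) (out : Int) : Decidable (Spec_max_blank_run_py text out) := by unfold Spec_max_blank_run_py; infer_instance

-- ===== CLAIM (what is proved, stated in full; the proofs are below) =====
def Claim_equal_max_blank_run_py : Prop := ∀ (text : String), Dom_max_blank_run_py text → Spec_max_blank_run_py text (max_blank_run_py text)

-- ===== LEMMAS AND PROOFS =====

-- proof-side model of splitting a char list on 'n' (reversed-accumulator form of splitOn.go)
def pvSplitN : List Char → List Char → List (List Char)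
  | cur, [] => [cur.reverse]
  | cur, c :: r => if c = 'n' then cur.reverse :: pvSplitN [] r else pvSplitN (c :: cur) r

-- run lengths of the segments of pvSplitN [] l
def pvRunLens : List Char → List Int
  | [] => [0]
  | c :: r =>
    if c = 'n' then 0 :: pvRunLens r
    else match pvRunLens r with
      | h :: t => (h + 1) :: t
      | [] => [1]

-- the value A's loop computes on a flag list, with current run c
def pvG : Int → List Char → Int
  | c, [] => c
  | c, x :: r => if x = 'n' then max c (pvG 0 r) else pvG (c + 1) r

theorem pv_go_eq (fuel : Nat) : ∀ (l cur : List Char) (acc : List (List Char)),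
    l.length ≤ fuel →
    PySem.Chars.splitOn.go ['n'] fuel l cur acc = acc.reverse ++ pvSplitN cur l := by
  induction fuel with
  | zero =>
    intro l cur acc h
    have hl : l = [] := List.eq_nil_of_length_eq_zero (Nat.le_zero.mp h)
    subst hl
    simp [PySem.Chars.splitOn.go, pvSplitN]
  | succ f ih =>
    intro l cur acc h
    cases l with
    | nil => simp [PySem.Chars.splitOn.go, pvSplitN]
    | cons c r =>
      by_cases hc : c = 'n'
      · subst hc
        have : List.isPrefixOf ['n'] ('n' :: r) = true := by
          simp [List.isPrefixOf]
        simp only [PySem.Chars.splitOn.go, this, if_pos]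
        rw [show List.drop (['n'] : List Char).length ('n' :: r) = r from rfl]
        rw [ih r [] (cur.reverse :: acc) (by simpa using Nat.lt_succ_iff.mp (by simpa using h))]
        simp [pvSplitN]
      · have : List.isPrefixOf ['n'] (c :: r) = false := by
          simp [List.isPrefixOf]
          exact fun hh => hc hh.symm
        simp only [PySem.Chars.splitOn.go, this]
        rw [ih r (c :: cur) acc (by simpa using Nat.lt_succ_iff.mp (by simpa using h))]
        simp [pvSplitN, hc]

theorem pv_splitOn_eq (l : List Char) :
    PySem.Chars.splitOn l ['n'] = pvSplitN [] l := by
  have := pv_go_eq (l.length + 1) l [] [] (by omega)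
  simpa [PySem.Chars.splitOn] using this

theorem pvSplitN_ne_nil (l cur : List Char) : pvSplitN cur l ≠ [] := by
  induction l generalizing cur with
  | nil => simp [pvSplitN]
  | cons c r ih =>
    by_cases hc : c = 'n'
    · simp [pvSplitN, hc]
    · simp only [pvSplitN, if_neg hc]
      exact ih _

theorem pvSplitN_cur (l : List Char) : ∀ (cur h : List Char) (t : List (List Char)),
    pvSplitN [] l = h :: t → pvSplitN cur l = (cur.reverse ++ h) :: t := by
  induction l with
  | nil =>
    intro cur h t he
    have he' : ([] : List Char) :: ([] : List (List Char)) = h :: t := by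
      simpa [pvSplitN] using he
    injection he' with he1 he2
    subst he1; subst he2
    simp [pvSplitN]
  | cons c r ih =>
    intro cur h t he
    by_cases hc : c = 'n'
    · subst hc
      have he' : ([] : List Char) :: pvSplitN [] r = h :: t := by
        simpa [pvSplitN] using he
      injection he' with he1 he2
      subst he1; subst he2
      simp [pvSplitN]
    · obtain ⟨h0, t0, hr⟩ : ∃ h0 t0, pvSplitN [] r = h0 :: t0 := by
        cases hh : pvSplitN [] r with
        | nil => exact absurd hh (pvSplitN_ne_nil r [])
        | cons a b => exact ⟨a, b, rfl⟩
      have h1 : pvSplitN [c] r = (c :: h0) :: t0 := by simpa using ih [c] h0 t0 hr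
      have h2 : pvSplitN (c :: cur) r = (cur.reverse ++ [c] ++ h0) :: t0 := by
        simpa using ih (c :: cur) h0 t0 hr
      have he' : (c :: h0) :: t0 = h :: t := by
        rw [← h1]
        simpa [pvSplitN, hc] using he
      injection he' with he1 he2
      subst he1; subst he2
      simp only [pvSplitN, if_neg hc]
      rw [h2]
      simp

theorem pvRunLens_ne_nil (l : List Char) : pvRunLens l ≠ [] := by
  induction l with
  | nil => simp [pvRunLens]
  | cons c r ih =>
    by_cases hc : c = 'n'
    · simp [pvRunLens, hc]
    · simp only [pvRunLens, if_neg hc]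
      cases hh : pvRunLens r with
      | nil => simp
      | cons a b => simp

theorem pv_runLens_eq (l : List Char) :
    (pvSplitN [] l).map (fun seg => (seg.length : Int)) = pvRunLens l := by
  induction l with
  | nil => simp [pvSplitN, pvRunLens]
  | cons c r ih =>
    by_cases hc : c = 'n'
    · subst hc; simp [pvSplitN, pvRunLens, ih]
    · obtain ⟨h0, t0, hr⟩ : ∃ h0 t0, pvSplitN [] r = h0 :: t0 := by
        cases hh : pvSplitN [] r with
        | nil => exact absurd hh (pvSplitN_ne_nil r [])
        | cons a b => exact ⟨a, b, rfl⟩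
      have h1 : pvSplitN [c] r = (c :: h0) :: t0 := by simpa using pvSplitN_cur r [c] h0 t0 hr
      have hrl : pvRunLens r = (h0.length : Int) :: t0.map (fun seg => (seg.length : Int)) := by
        rw [← ih, hr]; simp
      simp only [pvSplitN, if_neg hc, h1, pvRunLens, hrl]
      simp

theorem pv_foldl_max_out (t : List Int) : ∀ (c h : Int),
    t.foldl max (max c h) = max c (t.foldl max h) := by
  induction t with
  | nil => intro c h; rfl
  | cons x t ih =>
    intro c h
    simp only [List.foldl_cons]
    rw [max_assoc, ih]

theorem pv_le_foldl_max (t : List Int) (h : Int) : h ≤ t.foldl max h := by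
  have := pv_foldl_max_out t h h
  rw [max_self] at this
  rw [this]
  exact le_max_left _ _

theorem pv_runLens_head_nonneg (l : List Char) : ∀ (h : Int) (t : List Int),
    pvRunLens l = h :: t → 0 ≤ h := by
  induction l with
  | nil => intro h t he; simp [pvRunLens] at he; omega
  | cons c r ih =>
    intro h t he
    by_cases hc : c = 'n'
    · simp [pvRunLens, hc] at he; omega
    · simp only [pvRunLens, if_neg hc] at he
      cases hh : pvRunLens r with
      | nil => exact absurd hh (pvRunLens_ne_nil r)
      | cons a b =>
        rw [hh] at he
        have ha : 0 ≤ a := ih a b hh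
        simp at he
        omega

theorem pv_g_eq_foldl (l : List Char) : ∀ (c h : Int) (t : List Int),
    pvRunLens l = h :: t → pvG c l = t.foldl max (c + h) := by
  induction l with
  | nil =>
    intro c h t he
    simp [pvRunLens] at he
    obtain ⟨h1, h2⟩ := he
    subst h1; subst h2
    simp [pvG]
  | cons x r ih =>
    intro c h t he
    by_cases hx : x = 'n'
    · simp [pvRunLens, hx] at he
      obtain ⟨h1, h2⟩ := he
      subst h1
      obtain ⟨h0, t0, hr⟩ : ∃ h0 t0, pvRunLens r = h0 :: t0 := by
        cases hh : pvRunLens r with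
        | nil => exact absurd hh (pvRunLens_ne_nil r)
        | cons a b => exact ⟨a, b, rfl⟩
      rw [← h2, hr]
      simp only [pvG, if_pos hx, ih 0 h0 t0 hr]
      simp only [List.foldl_cons, zero_add]
      have : c + 0 = c := by omega
      rw [this, pv_foldl_max_out]
    · simp only [pvRunLens, if_neg hx] at he
      obtain ⟨h0, t0, hr⟩ : ∃ h0 t0, pvRunLens r = h0 :: t0 := by
        cases hh : pvRunLens r with
        | nil => exact absurd hh (pvRunLens_ne_nil r)
        | cons a b => exact ⟨a, b, rfl⟩
      rw [hr] at he
      simp at he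
      obtain ⟨h1, h2⟩ := he
      simp only [pvG, if_neg hx, ih (c + 1) h0 t0 hr]
      rw [← h2, ← h1]
      have : c + 1 + h0 = c + (h0 + 1) := by omega
      rw [this]

theorem pv_fold_eq_g (lines : List String) : ∀ (l c : Int),
    (let p := lines.foldl
        (fun (p : Int × Int) line =>
          if PySem.Str.strip line ≠ "" then (max p.1 p.2, 0) else (p.1, p.2 + 1))
        (l, c);
      max p.1 p.2)
    = max l (pvG c (lines.map (fun line => if PySem.Str.strip line ≠ "" then 'n' else 'b'))) := by
  induction lines with
  | nil => intro l c; simp [pvG]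
  | cons line rest ih =>
    intro l c
    by_cases hp : PySem.Str.strip line ≠ ""
    · simp only [List.foldl_cons, List.map_cons, if_pos hp]
      rw [ih (max l c) 0]
      simp [pvG, max_assoc]
    · simp only [List.foldl_cons, List.map_cons, if_neg hp]
      rw [ih l (c + 1)]
      simp [pvG]

-- ===== VERDICT (by name: the statement is the Claim_ definition above) =====
theorem max_blank_run_py_spec : Claim_equal_max_blank_run_py := by
  intro text _
  unfold Spec_max_blank_run_py max_blank_run_py max_blank_run_py_alt
  set flags : List Char :=
    (PySem.Str.splitlines text).map
      (fun line => if PySem.Str.strip line ≠ "" then 'n' else 'b') with hflags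
  obtain ⟨h0, t0, hr⟩ : ∃ h0 t0, pvRunLens flags = h0 :: t0 := by
    cases hh : pvRunLens flags with
    | nil => exact absurd hh (pvRunLens_ne_nil flags)
    | cons a b => exact ⟨a, b, rfl⟩
  have hsegs : (PySem.Chars.splitOn flags ['n']).map (fun seg => (seg.length : Int))
      = h0 :: t0 := by
    rw [pv_splitOn_eq, pv_runLens_eq, hr]
  rw [pv_fold_eq_g (PySem.Str.splitlines text) 0 0, ← hflags]
  show max 0 (pvG 0 flags) =
    (match PySem.List.max?
        ((PySem.Chars.splitOn flags ['n']).map (fun seg => (seg.length : Int)))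
        (fun y => y) with
     | some m => m
     | none => 0)
  rw [hsegs, PySem.List.max?_id_cons]
  show max 0 (pvG 0 flags) = t0.foldl max h0
  have hg : pvG 0 flags = t0.foldl max h0 := by
    have := pv_g_eq_foldl flags 0 h0 t0 hr
    simpa using this
  rw [hg]
  have h1 : (0 : Int) ≤ h0 := pv_runLens_head_nonneg flags h0 t0 hr
  have h2 : h0 ≤ t0.foldl max h0 := pv_le_foldl_max t0 h0
  exact max_eq_right (le_trans h1 h2)
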